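-- pv_equiv track=rewrite | github.com/shah-satyam/2024Spr_projects | dataProcessor.py | assign_col_names
-- ===== SOURCE A (Python) =====
-- def assign_col_names(use_cols: list, year: int) -> dict:
--     assign_names = dict()
--     for col in range(len(use_cols)):
--         if col == 0:
--             assign_names[use_cols[col]] = 'ZIPCODE'
--         elif col == 1:
--             assign_names[use_cols[col]] = str(year) + '_' + '0BR'
--         elif col == 2:
--             assign_names[use_cols[col]] = str(year) + '_' + '1BR'
--         elif col == 3:
--             assign_names[use_cols[col]] = str(year) + '_' + '2BR'
--         elif col == 4:
--             assign_names[use_cols[col]] = str(year) + '_' + '3BR'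
--         elif col == 5:
--             assign_names[use_cols[col]] = str(year) + '_' + '4BR'
--     return assign_names
-- ===== SOURCE B (Python) =====
-- def assign_col_names(use_cols: list, year: int) -> dict:
--     def build(cols, i, acc):
--         if not cols or i > 5:
--             return acc
--         acc[cols[0]] = 'ZIPCODE' if i == 0 else f'{year}_{i - 1}BR'
--         return build(cols[1:], i + 1, acc)
--     return build(use_cols, 0, {})
-- ===== Notes on version B (the rewrite author's own statement) =====
-- stated objective: alternative
-- what changed: Replaces A's indexed loop with a six-way if/elif branch ladder by structural recursion that consumes the list with a counter, stops as soon as the counter passes 5, and computes each label arithmetically ('ZIPCODE' for 0, f'{year}_{i-1}BR' otherwise) instead of dispatching on the index.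
import Mathlib
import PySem

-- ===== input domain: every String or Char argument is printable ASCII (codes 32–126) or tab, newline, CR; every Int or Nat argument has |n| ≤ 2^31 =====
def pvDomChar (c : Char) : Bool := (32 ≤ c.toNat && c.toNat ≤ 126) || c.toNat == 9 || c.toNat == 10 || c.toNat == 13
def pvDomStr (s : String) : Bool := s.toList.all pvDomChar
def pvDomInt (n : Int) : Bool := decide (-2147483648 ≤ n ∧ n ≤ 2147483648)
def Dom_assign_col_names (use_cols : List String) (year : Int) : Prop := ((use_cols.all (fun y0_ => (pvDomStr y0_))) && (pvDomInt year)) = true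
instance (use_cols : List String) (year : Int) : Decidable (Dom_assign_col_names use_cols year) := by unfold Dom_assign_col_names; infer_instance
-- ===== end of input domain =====

-- B replaces A's indexed loop with a branch ladder by a counting structural recursion that
-- stops past index 5 and computes each label arithmetically (alternative decomposition).

-- ===== PORT A =====
-- literal port of A: dict built by a loop over range(len(use_cols)) with an if/elif dispatch on the index
def assign_col_names (use_cols : List String) (year : Int) : List (String × String) :=
  ((PySem.List.pyRange 0 (PySem.List.len use_cols) 1).foldl
    (fun (d : PySem.Dict String String) (col : Int) =>
      if col == 0 then d.insert (PySem.List.pyGetD use_cols col "") "ZIPCODE"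
      else if col == 1 then d.insert (PySem.List.pyGetD use_cols col "") (PySem.Int.toStr year ++ "_" ++ "0BR")
      else if col == 2 then d.insert (PySem.List.pyGetD use_cols col "") (PySem.Int.toStr year ++ "_" ++ "1BR")
      else if col == 3 then d.insert (PySem.List.pyGetD use_cols col "") (PySem.Int.toStr year ++ "_" ++ "2BR")
      else if col == 4 then d.insert (PySem.List.pyGetD use_cols col "") (PySem.Int.toStr year ++ "_" ++ "3BR")
      else if col == 5 then d.insert (PySem.List.pyGetD use_cols col "") (PySem.Int.toStr year ++ "_" ++ "4BR")
      else d)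
    PySem.Dict.empty).items

-- ===== PORT B =====
-- literal port of B's helper 'build': structural recursion on the list with a counter i
def assignColNamesBuild (year : Int) : List String → Int → PySem.Dict String String → PySem.Dict String String
  | [], _, acc => acc
  | c :: rest, i, acc =>
    if i > 5 then acc
    else assignColNamesBuild year rest (i + 1)
      (acc.insert c (if i == 0 then "ZIPCODE"
                     else PySem.Int.toStr year ++ "_" ++ PySem.Int.toStr (i - 1) ++ "BR"))

-- literal port of B: build(use_cols, 0, {})
def assign_col_names_alt (use_cols : List String) (year : Int) : List (String × String) :=
  (assignColNamesBuild year use_cols 0 PySem.Dict.empty).items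

-- ===== PRECONDITION & SPEC =====
def Spec_assign_col_names (use_cols : List String) (year : Int) (out : List (String × String)) : Prop := out = assign_col_names_alt use_cols year
instance (use_cols : List String) (year : Int) (out : List (String × String)) : Decidable (Spec_assign_col_names use_cols year out) := by unfold Spec_assign_col_names; infer_instance

-- ===== CLAIM (what is proved, stated in full; the proofs are below) =====
def Claim_equal_assign_col_names : Prop := ∀ (use_cols : List String) (year : Int), Dom_assign_col_names use_cols year → Spec_assign_col_names use_cols year (assign_col_names use_cols year)

-- ===== LEMMAS AND PROOFS =====

-- A fold whose step is the identity on every element of the list returns its initial value.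
theorem foldl_noop {α : Type} (f : α → Int → α) (l : List Int)
    (hf : ∀ d x, x ∈ l → f d x = d) (d : α) : l.foldl f d = d := by
  induction l generalizing d with
  | nil => rfl
  | cons x xs ih =>
    rw [List.foldl_cons, hf d x (List.mem_cons_self)]
    exact ih (fun d y hy => hf d y (List.mem_cons_of_mem _ hy)) d

-- ===== VERDICT (by name: the statement is the Claim_ definition above) =====
theorem assign_col_names_spec : Claim_equal_assign_col_names := by
  intro use_cols year _
  unfold Spec_assign_col_names assign_col_names assign_col_names_alt
  have e0 : ("_" : String) ++ (PySem.Int.toStr 0 ++ "BR") = "_" ++ "0BR" := by decide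
  have e1 : ("_" : String) ++ (PySem.Int.toStr 1 ++ "BR") = "_" ++ "1BR" := by decide
  have e2 : ("_" : String) ++ (PySem.Int.toStr 2 ++ "BR") = "_" ++ "2BR" := by decide
  have e3 : ("_" : String) ++ (PySem.Int.toStr 3 ++ "BR") = "_" ++ "3BR" := by decide
  have e4 : ("_" : String) ++ (PySem.Int.toStr 4 ++ "BR") = "_" ++ "4BR" := by decide
  
  match use_cols with
  | [] => rfl
  | [u0] =>
    rw [show PySem.List.len [u0] = 1 from by simp,
        show PySem.List.pyRange 0 1 1 = [0] from by decide]
    simp [assignColNamesBuild, String.append_assoc, PySem.List.pyGetD_ofNat', e0, e1, e2, e3, e4]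
  | [u0, u1] =>
    rw [show PySem.List.len [u0, u1] = 2 from by simp,
        show PySem.List.pyRange 0 2 1 = [0, 1] from by decide]
    simp [assignColNamesBuild, String.append_assoc, PySem.List.pyGetD_ofNat', e0, e1, e2, e3, e4]
  | [u0, u1, u2] =>
    rw [show PySem.List.len [u0, u1, u2] = 3 from by simp,
        show PySem.List.pyRange 0 3 1 = [0, 1, 2] from by decide]
    simp [assignColNamesBuild, String.append_assoc, PySem.List.pyGetD_ofNat', e0, e1, e2, e3, e4]
  | [u0, u1, u2, u3] =>
    rw [show PySem.List.len [u0, u1, u2, u3] = 4 from by simp,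
        show PySem.List.pyRange 0 4 1 = [0, 1, 2, 3] from by decide]
    simp [assignColNamesBuild, String.append_assoc, PySem.List.pyGetD_ofNat', e0, e1, e2, e3, e4]
  | [u0, u1, u2, u3, u4] =>
    rw [show PySem.List.len [u0, u1, u2, u3, u4] = 5 from by simp,
        show PySem.List.pyRange 0 5 1 = [0, 1, 2, 3, 4] from by decide]
    simp [assignColNamesBuild, String.append_assoc, PySem.List.pyGetD_ofNat', e0, e1, e2, e3, e4]
  | u0 :: u1 :: u2 :: u3 :: u4 :: u5 :: rest =>
    rw [show PySem.List.len (u0 :: u1 :: u2 :: u3 :: u4 :: u5 :: rest) = 6 + (rest.length : Int)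
          from by simp; omega,
        PySem.List.pyRange_one_append 0 6 (6 + (rest.length : Int)) (by omega) (by omega),
        List.foldl_append,
        foldl_noop _ (PySem.List.pyRange 6 (6 + (rest.length : Int)) 1)
          (by intro d x hx
              have hx6 : 6 ≤ x := (PySem.List.mem_pyRange_one.mp hx).1
              have h0 : (x == (0:Int)) = false := by simp; omega
              have h1 : (x == (1:Int)) = false := by simp; omega
              have h2 : (x == (2:Int)) = false := by simp; omega
              have h3 : (x == (3:Int)) = false := by simp; omega
              have h4 : (x == (4:Int)) = false := by simp; omega
              have h5 : (x == (5:Int)) = false := by simp; omega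
              simp only [h0, h1, h2, h3, h4, h5, Bool.false_eq_true, if_false]),
        show PySem.List.pyRange 0 6 1 = [0, 1, 2, 3, 4, 5] from by decide]
    cases rest with
    | nil => simp [assignColNamesBuild, String.append_assoc, PySem.List.pyGetD_ofNat', e0, e1, e2, e3, e4]
    | cons r rs => simp [assignColNamesBuild, String.append_assoc, PySem.List.pyGetD_ofNat', e0, e1, e2, e3, e4]
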